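-- pv_equiv track=rewrite | github.com/Nautilus-Institute/quals-2022 | router/challenge/vm/mangle.py | get_funcs
-- ===== SOURCE A (Python) =====
-- from typing import List
--
-- def get_funcs(asm: List[str]) -> List[List[str]]:
--     funcs = [ ]
--     func = [ ]
--     for line in asm:
--         if "@function" in line:
--             if func:
--                 funcs.append(func)
--                 func = [ ]
--         func.append(line)
--
--     if func:
--         funcs.append(func)
--     return funcs
-- ===== SOURCE B (Python) =====
-- def get_funcs(asm):
--     if not asm:
--         return []
--     bounds = [i for i, line in enumerate(asm) if i > 0 and "@function" in line]
--     bounds.append(len(asm))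
--     return [asm[a:b] for a, b in zip([0] + bounds, bounds)]
-- ===== Notes on version B (the rewrite author's own statement) =====
-- stated objective: alternative
-- what changed: B first computes the list of block-boundary indices (every i>0 whose line contains "@function", plus len(asm)) in one pass and then returns the slices between consecutive boundaries, instead of A's single loop that accumulates the current block line by line and flushes it at each marker.
import Mathlib
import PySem

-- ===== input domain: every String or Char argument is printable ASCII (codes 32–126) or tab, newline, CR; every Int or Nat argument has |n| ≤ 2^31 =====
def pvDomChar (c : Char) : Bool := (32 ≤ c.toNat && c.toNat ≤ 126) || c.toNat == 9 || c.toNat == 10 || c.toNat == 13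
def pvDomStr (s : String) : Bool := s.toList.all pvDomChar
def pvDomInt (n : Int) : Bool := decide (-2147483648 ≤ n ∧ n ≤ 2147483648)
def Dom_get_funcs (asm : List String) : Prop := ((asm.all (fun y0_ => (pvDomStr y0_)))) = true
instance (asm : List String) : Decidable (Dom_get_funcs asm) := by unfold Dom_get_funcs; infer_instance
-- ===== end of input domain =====

-- Port A = the original line-accumulating loop; B computes boundary indices then slices between
-- consecutive boundaries (a different decomposition of the same split; objective: alternative).


-- ===== PORT A =====
-- '"@function" in line'
def pvMark (line : String) : Bool := PySem.Str.isIn "@function" line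

-- loop body of A's for-loop (state = (funcs, func))
def pvStepA (st : List (List String) × List String) (line : String) : List (List String) × List String :=
  let st := if pvMark line && !st.2.isEmpty then (st.1 ++ [st.2], ([] : List String)) else st
  (st.1, st.2 ++ [line])

def get_funcs (asm : List String) : List (List String) :=
  let st := asm.foldl pvStepA ([], [])
  if !st.2.isEmpty then st.1 ++ [st.2] else st.1

-- ===== PORT B =====
-- '[i for i, line in enumerate(asm) if i > 0 and "@function" in line]'
def pvBounds (asm : List String) : List Int :=
  ((PySem.List.enumerate asm 0).filter (fun il => decide (0 < il.1) && pvMark il.2)).map (·.1)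

def get_funcs_alt (asm : List String) : List (List String) :=
  if asm.isEmpty then []
  else
    let bounds := pvBounds asm ++ [(asm.length : Int)]
    (List.zip ((0 : Int) :: bounds) bounds).map
      (fun ab => PySem.List.slice asm (some ab.1) (some ab.2))

-- ===== PRECONDITION & SPEC =====
def Spec_get_funcs (asm : List String) (out : List (List String)) : Prop := out = get_funcs_alt asm
instance (asm : List String) (out : List (List String)) : Decidable (Spec_get_funcs asm out) := by unfold Spec_get_funcs; infer_instance

-- ===== CLAIM (what is proved, stated in full; the proofs are below) =====
def Claim_equal_get_funcs : Prop := ∀ (asm : List String), Dom_get_funcs asm → Spec_get_funcs asm (get_funcs asm)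

-- ===== LEMMAS AND PROOFS =====

-- a line that does NOT start a new block
def pvNoM (l : String) : Bool := !pvMark l

-- the common recursive characterisation of the split
def pvChunks : List String → List (List String)
  | [] => []
  | x :: r => (x :: r.takeWhile pvNoM) :: pvChunks (r.dropWhile pvNoM)
termination_by l => l.length
decreasing_by
  simp only [List.length_cons]
  have := List.length_dropWhile_le pvNoM r
  omega

def pvFin (st : List (List String) × List String) : List (List String) :=
  if !st.2.isEmpty then st.1 ++ [st.2] else st.1

-- ----- A = pvChunks -----
theorem pvA_loop (rest : List String) : ∀ (funcs : List (List String)) (func : List String),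
    func ≠ [] →
    pvFin (rest.foldl pvStepA (funcs, func)) =
      funcs ++ [func ++ rest.takeWhile pvNoM] ++ pvChunks (rest.dropWhile pvNoM) := by
  induction rest with
  | nil =>
    intro funcs func hf
    simp [pvFin, pvChunks, hf]
  | cons l rest' ih =>
    intro funcs func hf
    by_cases hm : pvMark l = true
    · have hstep : pvStepA (funcs, func) l = (funcs ++ [func], [l]) := by
        simp [pvStepA, hm, hf]
      rw [List.foldl_cons, hstep, ih (funcs ++ [func]) [l] (by simp)]
      rw [List.takeWhile_cons, List.dropWhile_cons]
      simp [pvNoM, hm, pvChunks]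
    · have hstep : pvStepA (funcs, func) l = (funcs, func ++ [l]) := by
        simp [pvStepA, hm]
      rw [List.foldl_cons, hstep, ih funcs (func ++ [l]) (by simp)]
      rw [List.takeWhile_cons, List.dropWhile_cons]
      simp [pvNoM, hm]

theorem pvA_eq (asm : List String) : get_funcs asm = pvChunks asm := by
  cases asm with
  | nil => simp [get_funcs, pvChunks]
  | cons x rest =>
    have hstep : pvStepA ([], []) x = ([], [x]) := by simp [pvStepA]
    have : get_funcs (x :: rest) = pvFin ((x :: rest).foldl pvStepA ([], [])) := by
      simp [get_funcs, pvFin]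
    rw [this, List.foldl_cons, hstep, pvA_loop rest [] [x] (by simp)]
    simp [pvChunks]

-- ----- B = pvChunks -----

-- all marker indices of l, counting from s
def pvMIdx (l : List String) (s : Int) : List Int :=
  ((PySem.List.enumerate l s).filter (fun il => pvMark il.2)).map (·.1)

theorem pvMIdx_nil (s : Int) : pvMIdx [] s = [] := by simp [pvMIdx, PySem.List.enumerate]

theorem pvMIdx_cons (y : String) (l : List String) (s : Int) :
    pvMIdx (y :: l) s = (if pvMark y then [s] else []) ++ pvMIdx l (s + 1) := by
  rw [pvMIdx, PySem.List.enumerate_cons]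
  by_cases h : pvMark y = true <;> simp [h, pvMIdx]

theorem pvMIdx_append (u v : List String) (s : Int) :
    pvMIdx (u ++ v) s = pvMIdx u s ++ pvMIdx v (s + u.length) := by
  rw [pvMIdx, PySem.List.enumerate_append]
  simp [pvMIdx]

theorem pvMIdx_nomark (t : List String) (s : Int) (h : ∀ l ∈ t, pvMark l = false) :
    pvMIdx t s = [] := by
  induction t generalizing s with
  | nil => exact pvMIdx_nil s
  | cons y l ih =>
    rw [pvMIdx_cons]
    simp [h y (by simp), ih (s+1) (fun x hx => h x (by simp [hx]))]

theorem pvMIdx_shift (l : List String) : ∀ s : Int, pvMIdx l s = (pvMIdx l 0).map (· + s) := by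
  induction l with
  | nil => intro s; simp [pvMIdx_nil]
  | cons y l ih =>
    intro s
    rw [pvMIdx_cons, pvMIdx_cons, ih (s+1), ih (0+1)]
    have hmap : List.map (fun x => x + (s + 1)) (pvMIdx l 0)
        = List.map (fun x => x + (0 + 1) + s) (pvMIdx l 0) :=
      List.map_congr_left (fun x _ => by omega)
    by_cases h : pvMark y = true <;>
      simp [h, List.map_map, Function.comp_def, hmap]

theorem pvMIdx_mem_bounds (l : List String) (s : Int) (z : Int) (hz : z ∈ pvMIdx l s) :
    s ≤ z ∧ z < s + l.length := by
  rcases List.mem_map.mp hz with ⟨il, hmem, rfl⟩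
  rcases (PySem.List.mem_enumerate_iff l s il).mp (List.mem_of_mem_filter hmem) with ⟨k, hk, rfl⟩
  constructor <;> simp <;> omega

-- B's comprehension is exactly the marker indices of the tail, counting from 1
theorem pvBounds_cons (x : String) (r : List String) :
    pvBounds (x :: r) = pvMIdx r 1 := by
  rw [pvBounds, PySem.List.enumerate_cons]
  rw [List.filter_cons]
  simp only [decide_eq_true_eq, lt_self_iff_false, decide_false, Bool.false_and, if_false]
  rw [pvMIdx]
  congr 1
  apply List.filter_congr
  intro il hil
  rcases (PySem.List.mem_enumerate_iff r 1 il).mp hil with ⟨k, hk, rfl⟩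
  simp; omega

theorem pvDropLem (x : String) (t d : List String) (k : Nat) :
    List.drop (t.length + 1 + k) (x :: (t ++ d)) = List.drop k d := by
  have h1 : t.length + 1 + k = (t.length + k) + 1 := by omega
  rw [h1, List.drop_succ_cons, List.drop_append]
  simp

theorem pvTakeLem (x : String) (t d : List String) :
    List.take (t.length + 1) (x :: (t ++ d)) = x :: t := by
  rw [List.take_succ_cons, List.take_left]

theorem pvB_cons (asm : List String) (h : ¬ asm.isEmpty) :
    get_funcs_alt asm = (List.zip ((0 : Int) :: (pvBounds asm ++ [(asm.length : Int)]))
        (pvBounds asm ++ [(asm.length : Int)])).map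
      (fun ab => PySem.List.slice asm (some ab.1) (some ab.2)) := by
  rw [get_funcs_alt]
  simp [h]

theorem pvB_eq (asm : List String) : get_funcs_alt asm = pvChunks asm := by
  induction asm using pvChunks.induct with
  | case1 => simp [get_funcs_alt, pvChunks]
  | case2 x r ih =>
    -- notation: t = marker-free prefix of r, d = rest of r
    have htd : r.takeWhile pvNoM ++ r.dropWhile pvNoM = r := List.takeWhile_append_dropWhile
    set t := r.takeWhile pvNoM with ht_def
    set d := r.dropWhile pvNoM with hd_def
    have ht : ∀ l ∈ t, pvMark l = false := by
      intro l hl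
      have := List.mem_takeWhile_imp hl
      simpa [pvNoM] using this
    have hbx : pvBounds (x :: r) = pvMIdx d (1 + (t.length : Int)) := by
      rw [pvBounds_cons, ← htd, pvMIdx_append, pvMIdx_nomark t 1 ht]
      simp
    cases hd : d with
    | nil =>
      have hrt : r = t := by rw [← htd, hd]; simp
      rw [pvB_cons (x :: r) (by simp)]
      rw [hbx, hd, pvMIdx_nil]
      have h0 : (0 : Int) = ((0 : Nat) : Int) := by norm_num
      simp only [List.nil_append, List.zip_cons_cons, List.zip_nil_right, List.map_cons,
        List.map_nil, h0, PySem.List.slice_natCast]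
      simp [pvChunks, ← ht_def, ← hd_def, hd, ← hrt]
    | cons y d' =>
      have hmy : pvMark y = true := by
        have h2 := List.head_dropWhile_not (p := pvNoM) (l := r) (by rw [← hd_def, hd]; simp)
        simp only [← hd_def, hd, List.head_cons] at h2
        simpa [pvNoM] using h2
      set sn : Nat := (x :: t).length with hsn_def
      have hsn : sn = 1 + t.length := by rw [hsn_def]; simp [Nat.add_comm]
      have hasm : x :: r = (x :: t) ++ d := by rw [← htd]; simp
      have hlen : ((x :: r).length : Int) = (d.length : Int) + (sn : Int) := by
        rw [hasm]; rw [hsn_def]; push_cast [List.length_append]; ring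
      set bd : List Int := pvBounds d ++ [(d.length : Int)] with hbd_def
      have hbd_mem : ∀ z ∈ (0 : Int) :: bd, 0 ≤ z ∧ z ≤ (d.length : Int) := by
        intro z hz
        rcases List.mem_cons.mp hz with rfl | hz
        · constructor <;> simp
        rw [hbd_def] at hz
        rcases List.mem_append.mp hz with hz | hz
        · rw [hd, pvBounds_cons] at hz
          have := pvMIdx_mem_bounds d' 1 z hz
          rw [hd]; simp at this ⊢; omega
        · simp at hz; simp [hz]
      -- B's boundary list on (x :: r) is the recursive boundary list shifted by sn
      have hshift : pvBounds (x :: r) ++ [((x :: r).length : Int)]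
          = ((0 : Int) :: bd).map (· + (sn : Int)) := by
        rw [hbx, hlen, hbd_def, hd, pvBounds_cons, pvMIdx_cons, hmy]
        rw [pvMIdx_shift d' (1 + (t.length : Int) + 1), pvMIdx_shift d' 1]
        simp only [List.map_cons, List.map_append, List.map_map, if_true, List.cons_append,
          List.singleton_append, List.map_nil]
        have hc : List.map ((fun z => z + (sn : Int)) ∘ fun z => z + 1) (pvMIdx d' 0)
            = List.map (fun z => z + (1 + (t.length : Int) + 1)) (pvMIdx d' 0) :=
          List.map_congr_left (fun z _ => by simp [hsn]; push_cast; ring)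
        rw [hc]
        congr 1
        rw [hsn]; push_cast; ring
      -- slicing a shifted pair out of (x :: t) ++ d = slicing the pair out of d
      have hslice : ∀ ab ∈ List.zip ((0 : Int) :: bd) bd,
          PySem.List.slice (x :: r) (some (ab.1 + (sn : Int))) (some (ab.2 + (sn : Int)))
            = PySem.List.slice d (some ab.1) (some ab.2) := by
        intro ab hab
        have h1 : ab.1 ∈ (0 : Int) :: bd := List.of_mem_zip hab |>.1
        have h2 : ab.2 ∈ bd := List.of_mem_zip hab |>.2
        rcases hbd_mem ab.1 h1 with ⟨ha0, _⟩
        rcases hbd_mem ab.2 (List.mem_cons_of_mem _ h2) with ⟨hb0, _⟩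
        rw [PySem.List.slice_toNat _ (by omega) (by omega),
            PySem.List.slice_toNat _ ha0 hb0]
        have e1 : (ab.1 + (sn : Int)).toNat = sn + ab.1.toNat := by omega
        have e2 : (ab.2 + (sn : Int)).toNat - (ab.1 + (sn : Int)).toNat
            = ab.2.toNat - ab.1.toNat := by omega
        rw [e2, e1]
        congr 1
        rw [hasm]
        have h3 : sn + ab.1.toNat = t.length + 1 + ab.1.toNat := by
          rw [hsn]; omega
        rw [h3]
        simpa using pvDropLem x t d ab.1.toNat
      -- the first slice is the first block
      have hhead : PySem.List.slice (x :: r) (some (0 : Int)) (some ((0 : Int) + (sn : Int)))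
          = x :: t := by
        rw [PySem.List.slice_toNat _ (by omega) (by omega)]
        have e1 : ((0 : Int) + (sn : Int)).toNat - (0 : Int).toNat = sn := by omega
        rw [e1, hasm]
        have h3 : sn = t.length + 1 := by rw [hsn]; omega
        rw [h3]
        simpa using pvTakeLem x t d
      -- assemble
      have hL0 : ((0 : Int) :: bd).map (· + (sn : Int)) = ((0 : Int) + (sn : Int)) :: bd.map (· + (sn : Int)) := by
        simp
      rw [pvB_cons (x :: r) (by simp), hshift, hL0, List.zip_cons_cons, ← hL0]
      have hzm : List.zip (((0 : Int) :: bd).map (· + (sn : Int))) (bd.map (· + (sn : Int)))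
          = (List.zip ((0 : Int) :: bd) bd).map (Prod.map (· + (sn : Int)) (· + (sn : Int))) :=
        List.zip_map
      rw [hzm, List.map_cons, List.map_map]
      have htail : List.map ((fun ab => PySem.List.slice (x :: r) (some ab.1) (some ab.2)) ∘
            Prod.map (· + (sn : Int)) (· + (sn : Int))) (List.zip ((0 : Int) :: bd) bd)
          = List.map (fun ab => PySem.List.slice d (some ab.1) (some ab.2))
              (List.zip ((0 : Int) :: bd) bd) :=
        List.map_congr_left (fun ab hab => by
          simp only [Function.comp_apply, Prod.map_fst, Prod.map_snd]
          exact hslice ab hab)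
      rw [htail, hhead]
      have hrec : List.map (fun ab => PySem.List.slice d (some ab.1) (some ab.2))
            (List.zip ((0 : Int) :: bd) bd) = get_funcs_alt d := by
        rw [pvB_cons d (by rw [hd]; simp), ← hbd_def]
      rw [hrec, ih]
      simp [pvChunks, ← ht_def, ← hd_def]

-- ===== VERDICT (by name: the statement is the Claim_ definition above) =====
theorem get_funcs_spec : Claim_equal_get_funcs := by
  intro asm _
  unfold Spec_get_funcs
  rw [pvA_eq, pvB_eq]
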